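-- pv_equiv track=rewrite | github.com/MichelangeloLeoni/analisi_statistica_dei_dati | src/asd/interval_estimation/interval.py | find_intervals_indices
-- ===== SOURCE A (Python) =====
-- def find_intervals_indices(mask):
--     '''
--     Identify contiguous acceptance intervals in a boolean mask.
--
--     This is useful when the acceptance region is not a single block
--     but consists of multiple disjoint intervals.
--
--     Parameters:
--         mask : array-like (bool)
--             Boolean array representing acceptance region.
--
--     Output:
--         starts : list of int
--             Indices where True regions begin.
--         ends : list of int
--             Indices where True regions end.
--     '''
--
--     starts = []
--     ends = []
--
--     # Detect transitions between False -> True and True -> False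
--     for i in range(1, len(mask)):
--
--         # Start of a new accepted region
--         if not mask[i - 1] and mask[i]:
--             starts.append(i)
--
--         # End of an accepted region
--         if mask[i - 1] and not mask[i]:
--             ends.append(i - 1)
--
--     # Edge cases: region starts at first element
--     if mask[0]:
--         starts.insert(0, 0)
--
--     # Edge cases: region ends at last element
--     if mask[-1]:
--         ends.append(len(mask) - 1)
--
--     return starts, ends
-- ===== SOURCE B (Python) =====
-- def find_intervals_indices(mask):
--     '''
--     Two-pointer run-skipping scan: locate each maximal run of equal
--     truth values at once and record the start and end of every True
--     run together, instead of detecting rising/falling edges pairwise.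
--     '''
--     starts = []
--     ends = []
--     n = len(mask)
--     i = 0
--     while i < n:
--         v = bool(mask[i])
--         j = i + 1
--         while j < n and bool(mask[j]) == v:
--             j += 1
--         if v:
--             starts.append(i)
--             ends.append(j - 1)
--         i = j
--     return starts, ends
-- ===== Notes on version B (the rewrite author's own statement) =====
-- stated objective: alternative
-- what changed: Replaces A's adjacent-pair edge-detection loop with its three boundary patch-ups (insert at 0, mask[0]/mask[-1] checks) by a two-pointer run-skipping scan that jumps over each maximal run and records the start and end of every True run together.
import Mathlib
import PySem

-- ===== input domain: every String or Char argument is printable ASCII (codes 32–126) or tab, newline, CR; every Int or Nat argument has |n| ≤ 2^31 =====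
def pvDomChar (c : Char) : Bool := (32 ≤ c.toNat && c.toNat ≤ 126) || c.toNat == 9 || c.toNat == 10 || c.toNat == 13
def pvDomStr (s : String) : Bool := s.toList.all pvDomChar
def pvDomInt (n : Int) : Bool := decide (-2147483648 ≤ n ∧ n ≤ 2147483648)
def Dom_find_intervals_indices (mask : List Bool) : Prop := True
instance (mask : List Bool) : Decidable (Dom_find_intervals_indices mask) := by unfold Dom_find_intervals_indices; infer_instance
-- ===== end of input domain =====

-- B replaces A's adjacent-pair edge-detection loop and its boundary patch-ups by a
-- two-pointer run-skipping scan recording each True run's start and end together;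
-- objective: alternative, same O(n) cost.

-- ===== PORT A =====
-- A's loop body, named for readability; pyGetD with default false is exact here because every
-- index the loop reads lies in range, and mask[0]/mask[-1] are reached only under Pre_
-- (mask nonempty), where they are in range too.
def aStep (mask : List Bool) (se : List Int × List Int) (i : Int) : List Int × List Int :=
  let se1 :=
    if !(PySem.List.pyGetD mask (i - 1) false) && PySem.List.pyGetD mask i false then
      (se.1 ++ [i], se.2)
    else se
  if PySem.List.pyGetD mask (i - 1) false && !(PySem.List.pyGetD mask i false) then
    (se1.1, se1.2 ++ [i - 1])
  else se1

def find_intervals_indices (mask : List Bool) : List Int × List Int :=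
  let n : Int := (mask.length : Int)
  let p := (PySem.List.pyRange 1 n 1).foldl (aStep mask) ([], [])
  let starts := if PySem.List.pyGetD mask 0 false then 0 :: p.1 else p.1
  let ends := if PySem.List.pyGetD mask (-1) false then p.2 ++ [n - 1] else p.2
  (starts, ends)

-- ===== PORT B =====
-- B's inner while loop: how many leading elements of xs equal v (how far j advances).
def bInner : Bool → List Bool → Nat
  | _, [] => 0
  | v, x :: xs => if x == v then 1 + bInner v xs else 0

-- B's outer while loop: skip the maximal run starting at index i; if it is a True run,
-- record its start i and its end j-1 = i+m; continue at i+1+m.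
def bOuter : List Bool → Int → List Int × List Int
  | [], _ => ([], [])
  | x :: xs, i =>
    let m := bInner x xs
    let r := bOuter (xs.drop m) (i + 1 + (m : Int))
    if x then (i :: r.1, (i + (m : Int)) :: r.2) else r
termination_by l _ => l.length
decreasing_by
  have := List.length_drop (l := xs) (i := bInner x xs)
  simp at this ⊢

def find_intervals_indices_alt (mask : List Bool) : List Int × List Int :=
  bOuter mask 0

-- ===== PRECONDITION & SPEC =====
-- Pre_ excludes only the empty mask, on which A raises IndexError at mask[0].
def Pre_find_intervals_indices (mask : List Bool) : Prop := mask ≠ []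
instance (mask : List Bool) : Decidable (Pre_find_intervals_indices mask) := by
  unfold Pre_find_intervals_indices; infer_instance

def pvWitness_find_intervals_indices : List Bool := [true, false, true]

def Spec_find_intervals_indices (mask : List Bool) (out : List Int × List Int) : Prop :=
  out = find_intervals_indices_alt mask
instance (mask : List Bool) (out : List Int × List Int) :
    Decidable (Spec_find_intervals_indices mask out) := by
  unfold Spec_find_intervals_indices; infer_instance

-- ===== CLAIM (what is proved, stated in full; the proofs are below) =====
def Claim_equal_find_intervals_indices : Prop :=
  ∀ (mask : List Bool), Dom_find_intervals_indices mask →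
    Pre_find_intervals_indices mask →
    Spec_find_intervals_indices mask (find_intervals_indices mask)

-- ===== LEMMAS AND PROOFS =====

-- common characterisation: the start/end indices contributed by segment `xs` starting at
-- index i, with `r` the mask value just before the segment.
def runsGo : List Bool → Int → Bool → List Int × List Int
  | [], _, _ => ([], [])
  | x :: xs, i, r =>
    let p := runsGo xs (i + 1) x
    ((if !r && x then [i] else []) ++ p.1, (if r && !x then [i - 1] else []) ++ p.2)

lemma getD_append_cons (pre : List Bool) (b : Bool) (l : List Bool) :
    (pre ++ b :: l).getD pre.length false = b := by
  induction pre with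
  | nil => rfl
  | cons a pre ih => simpa using ih

-- A's transition loop over range(k, n) accumulates exactly runsGo of the suffix after position k-1.
lemma loopA (rest : List Bool) : ∀ (pre : List Bool) (prev : Bool) (s e : List Int),
    (PySem.List.pyRange ((pre.length + 1 : Nat) : Int)
        (((pre ++ prev :: rest).length : Nat) : Int) 1).foldl (aStep (pre ++ prev :: rest)) (s, e)
    = (s ++ (runsGo rest ((pre.length + 1 : Nat) : Int) prev).1,
       e ++ (runsGo rest ((pre.length + 1 : Nat) : Int) prev).2) := by
  induction rest with
  | nil =>
    intro pre prev s e
    rw [PySem.List.pyRange_one_eq_nil (by simp)]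
    simp [runsGo]
  | cons x rest ih =>
    intro pre prev s e
    have hlt : ((pre.length + 1 : Nat) : Int) < (((pre ++ prev :: x :: rest).length : Nat) : Int) := by
      simp only [List.length_append, List.length_cons]
      push_cast
      omega
    rw [PySem.List.pyRange_one_cons hlt, List.foldl_cons]
    have hi1 : (((pre.length + 1 : Nat) : Int) - 1) = ((pre.length : Nat) : Int) := by push_cast; ring
    have hprev : PySem.List.pyGetD (pre ++ prev :: x :: rest) (((pre.length + 1 : Nat) : Int) - 1) false = prev := by
      rw [hi1, PySem.List.pyGetD_natCast]
      exact getD_append_cons pre prev (x :: rest)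
    have hcur : PySem.List.pyGetD (pre ++ prev :: x :: rest) ((pre.length + 1 : Nat) : Int) false = x := by
      have h2 : ((pre.length + 1 : Nat) : Int) = (((pre ++ [prev]).length : Nat) : Int) := by simp
      have h3 : pre ++ prev :: x :: rest = (pre ++ [prev]) ++ x :: rest := by simp
      rw [h2, PySem.List.pyGetD_natCast, h3]
      exact getD_append_cons (pre ++ [prev]) x rest
    have ih' := ih (pre ++ [prev]) x
    have hmask : (pre ++ [prev]) ++ x :: rest = pre ++ prev :: x :: rest := by simp
    have hlen : (((pre ++ [prev]).length + 1 : Nat) : Int) = ((pre.length + 1 : Nat) : Int) + 1 := by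
      simp only [List.length_append, List.length_cons, List.length_nil]
      push_cast
      ring
    rw [hmask, hlen] at ih'
    simp only [aStep, hprev, hcur]
    cases prev <;> cases x <;>
      simp only [Bool.not_true, Bool.not_false, Bool.and_true, Bool.and_false, if_true, ih', runsGo] <;>
      simp [List.append_assoc]

-- Python's mask[-1] on a nonempty list is its last element.
lemma pyGetD_neg_one (h : Bool) (t : List Bool) :
    PySem.List.pyGetD (h :: t) (-1) false = t.getLastD h := by
  induction t generalizing h with
  | nil => rfl
  | cons y t ih =>
    have e1 : PySem.List.pyGetD (h :: y :: t) (-1) false = PySem.List.pyGetD (y :: t) (-1) false := by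
      simp only [PySem.List.pyGetD, PySem.List.pyGet?, PySem.List.pyIdx?]
      simp
      rfl
    rw [e1, ih, List.getLastD_cons]

-- bInner counts the leading run: the prefix is a replicate and the remainder starts differently.
lemma bInner_take (v : Bool) (xs : List Bool) :
    List.take (bInner v xs) xs = List.replicate (bInner v xs) v := by
  induction xs with
  | nil => rfl
  | cons x xs ih =>
    by_cases h : x = v
    · subst h
      rw [show bInner x (x :: xs) = bInner x xs + 1 from by simp [bInner, Nat.add_comm]]
      simp [List.replicate_succ, ih]
    · have : (x == v) = false := by simp [h]
      simp [bInner, this]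

lemma bInner_drop_head (v : Bool) (xs : List Bool) :
    (List.drop (bInner v xs) xs).head? = none ∨
    (List.drop (bInner v xs) xs).head? = some (!v) := by
  induction xs with
  | nil => left; rfl
  | cons x xs ih =>
    by_cases h : x = v
    · subst h
      rw [show bInner x (x :: xs) = bInner x xs + 1 from by simp [bInner, Nat.add_comm]]
      simpa using ih
    · have hb : (x == v) = false := by simp [h]
      right
      have : x = !v := by cases v <;> cases x <;> simp_all
      simp [bInner, hb, this]

lemma bInner_split (v : Bool) (xs : List Bool) :
    xs = List.replicate (bInner v xs) v ++ List.drop (bInner v xs) xs := by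
  conv_lhs => rw [← List.take_append_drop (bInner v xs) xs]
  rw [bInner_take]

-- runsGo sees no transition inside a run equal to prev.
lemma runsGo_replicate (m : Nat) (v : Bool) (rest : List Bool) : ∀ (i : Int),
    runsGo (List.replicate m v ++ rest) i v = runsGo rest (i + m) v := by
  induction m with
  | zero => intro i; simp
  | succ m ih =>
    intro i
    rw [List.replicate_succ, List.cons_append]
    show runsGo (v :: (List.replicate m v ++ rest)) i v = _
    simp only [runsGo, ih (i + 1)]
    cases v <;> simp <;> ring_nf

lemma getLastD_append_ne_nil (l d : List Bool) (c : Bool) (h : d ≠ []) :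
    (l ++ d).getLastD c = d.getLastD c := by
  induction l with
  | nil => rfl
  | cons a l ih =>
    cases l with
    | nil => cases d with
      | nil => exact absurd rfl h
      | cons y ys => simp [List.getLastD_cons, ih]
    | cons b l' => simp [List.getLastD_cons] at ih ⊢; exact ih

lemma getLastD_replicate (m : Nat) (v c : Bool) :
    (v :: List.replicate m v).getLastD c = v := by
  induction m generalizing c with
  | zero => rfl
  | succ m ih => rw [List.replicate_succ, List.getLastD_cons]; exact ih v

-- runsGo unfolding with prev = false.
lemma runsGo_cons_false (x : Bool) (xs : List Bool) (i : Int) :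
    runsGo (x :: xs) i false
      = ((if x then [i] else []) ++ (runsGo xs (i + 1) x).1, (runsGo xs (i + 1) x).2) := by
  cases x <;> simp [runsGo]

-- at a transition, prev = x behaves like prev = false up to one extra end index.
lemma runsGo_flip (x : Bool) (d' : List Bool) (j : Int) :
    runsGo ((!x) :: d') j x
      = ((runsGo ((!x) :: d') j false).1,
         (if x then [j - 1] else []) ++ (runsGo ((!x) :: d') j false).2) := by
  cases x <;> simp [runsGo]

-- the cons step of the main characterisation, shared by both induction cases.
lemma bOuter_eq_cons (x : Bool) (xs : List Bool) (i : Int)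
    (ih : bOuter (List.drop (bInner x xs) xs) (i + 1 + ((bInner x xs) : Int))
        = ((runsGo (List.drop (bInner x xs) xs) (i + 1 + ((bInner x xs) : Int)) false).1,
           (runsGo (List.drop (bInner x xs) xs) (i + 1 + ((bInner x xs) : Int)) false).2 ++
             if (List.drop (bInner x xs) xs).getLastD false then
               [(i + 1 + ((bInner x xs) : Int)) + (((List.drop (bInner x xs) xs).length) : Int) - 1]
             else [])) :
    bOuter (x :: xs) i
      = ((runsGo (x :: xs) i false).1,
         (runsGo (x :: xs) i false).2 ++
           if (x :: xs).getLastD false then [i + (((x :: xs).length) : Int) - 1] else []) := by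
  set m := bInner x xs with hm
  set d := List.drop m xs with hd
  have hsplit : xs = List.replicate m x ++ d := bInner_split x xs
  have hrun : runsGo xs (i + 1) x = runsGo d (i + 1 + (m : Int)) x := by
    conv_lhs => rw [hsplit]
    rw [runsGo_replicate]
  have hB : bOuter (x :: xs) i
      = if x then (i :: (bOuter d (i + 1 + (m : Int))).1,
                   (i + (m : Int)) :: (bOuter d (i + 1 + (m : Int))).2)
        else bOuter d (i + 1 + (m : Int)) := by
    rw [bOuter]
  have hlen : xs.length = m + d.length := by
    conv_lhs => rw [hsplit]
    simp
  rcases bInner_drop_head x xs with h0 | h0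
  · -- the run reaches the end of the list: d = []
    have hdnil : d = [] := by
      cases hdd : d with
      | nil => rfl
      | cons a b => rw [← hd, hdd] at h0; simp at h0
    have hlast : (x :: xs).getLastD false = x := by
      rw [hsplit, hdnil, List.append_nil, getLastD_replicate]
    rw [hB, ih, hdnil, hlast, runsGo_cons_false, hrun, hdnil]
    have hxlen : xs.length = m := by simp [hlen, hdnil]
    cases x <;> simp [runsGo, hxlen] <;> omega
  · -- the run is followed by the opposite value: d = (!x) :: d.tail
    have hdcons : d = (!x) :: d.tail := by
      cases hdd : d with
      | nil => rw [← hd, hdd] at h0; simp at h0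
      | cons a b => rw [← hd, hdd] at h0; simp only [List.head?_cons, Option.some.injEq] at h0; simp [hdd, h0]
    have hdne : d ≠ [] := by rw [hdcons]; simp
    have hlast : (x :: xs).getLastD false = d.getLastD false := by
      have : x :: xs = (x :: List.replicate m x) ++ d := by
        rw [List.cons_append, ← hsplit]
      rw [this, getLastD_append_ne_nil _ _ _ hdne]
    have hflip : runsGo d (i + 1 + (m : Int)) x
        = ((runsGo d (i + 1 + (m : Int)) false).1,
           (if x then [i + 1 + (m : Int) - 1] else []) ++
             (runsGo d (i + 1 + (m : Int)) false).2) := by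
      conv_lhs => rw [hdcons]
      rw [runsGo_flip, ← hdcons]
    have hlen2 : i + (((x :: xs).length : Nat) : Int) - 1
        = i + 1 + (m : Int) + ((d.length : Nat) : Int) - 1 := by
      simp [hlen]; push_cast; ring
    have harith : i + 1 + (m : Int) - 1 = i + (m : Int) := by ring
    rw [harith] at hflip
    rw [hB, ih, runsGo_cons_false, hrun, hflip, hlast, hlen2]
    cases x <;> simp

-- main characterisation of B's run-skipping loop (fuel induction on the list length).
lemma bOuter_eq_aux : ∀ (n : Nat) (l : List Bool), l.length ≤ n → ∀ (i : Int),
    bOuter l i = ((runsGo l i false).1,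
      (runsGo l i false).2 ++
        if l.getLastD false then [i + (l.length : Int) - 1] else []) := by
  intro n
  induction n with
  | zero =>
    intro l hl i
    have hnil : l = [] := by cases l with
      | nil => rfl
      | cons a b => simp at hl
    subst hnil
    simp [bOuter, runsGo]
  | succ n ih =>
    intro l hl i
    cases l with
    | nil => simp [bOuter, runsGo]
    | cons x xs =>
      refine bOuter_eq_cons x xs i (ih _ ?_ _)
      have h1 : (List.drop (bInner x xs) xs).length ≤ xs.length := by
        simp
      simp only [List.length_cons] at hl
      omega

lemma bOuter_eq (l : List Bool) (i : Int) :
    bOuter l i = ((runsGo l i false).1,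
      (runsGo l i false).2 ++
        if l.getLastD false then [i + (l.length : Int) - 1] else []) :=
  bOuter_eq_aux l.length l le_rfl i

-- ===== VERDICT (by name: the statement is the Claim_ definition above) =====
theorem find_intervals_indices_spec : Claim_equal_find_intervals_indices := by
  intro mask _ hpre
  unfold Spec_find_intervals_indices
  cases mask with
  | nil => exact absurd rfl hpre
  | cons h t =>
    show find_intervals_indices (h :: t) = find_intervals_indices_alt (h :: t)
    unfold find_intervals_indices find_intervals_indices_alt
    have hA := loopA t [] h ([] : List Int) ([] : List Int)
    have h0 : PySem.List.pyGetD (h :: t) 0 false = h := by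
      rw [PySem.List.pyGetD_ofNat']; rfl
    have hBeq := bOuter_eq (h :: t) 0
    rw [hBeq, runsGo_cons_false]
    simp only [List.nil_append, List.length_nil, List.length_cons, Nat.zero_add] at hA ⊢
    push_cast at hA ⊢
    rw [h0, pyGetD_neg_one, List.getLastD_cons]
    rw [hA]
    cases h <;> cases ht : t.getLastD false <;> cases ht2 : t.getLastD true <;>
      simp_all [List.append_assoc] <;> ring_nf
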